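-- pv_equiv track=rewrite | github.com/shivamr021/DSA | Coding Ninjas/Slot Game.py | slotScore
-- ===== SOURCE A (Python) =====
-- from collections import Counter
--
-- def slotScore(original, guess):
--     points = 0
--     # Lists to store unmatched colors after perfect hits
--     unmatched_original = []
--     unmatched_guess = []
--
--     # Step 1: Find perfect hits
--     for o, g in zip(original, guess):
--         if o == g:
--             points += 2
--         else:
--             unmatched_original.append(o)
--             unmatched_guess.append(g)
--
--     # Step 2: Count pseudo hits
--     count_original = Counter(unmatched_original)
--
--     for g in unmatched_guess:
--         if count_original[g] > 0:
--             points += 1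
--             count_original[g] -= 1  # consume one occurrence
--
--     return points
-- ===== SOURCE B (Python) =====
-- from collections import Counter
--
-- def slotScore(original, guess):
--     pairs = list(zip(original, guess))
--     perfect = sum(1 for o, g in pairs if o == g)
--     count_orig = Counter(o for o, _ in pairs)
--     count_guess = Counter(g for _, g in pairs)
--     total = sum(min(count_orig[c], count_guess[c]) for c in count_orig)
--     return 2 * perfect + (total - perfect)
-- ===== Notes on version B (the rewrite author's own statement) =====
-- stated objective: alternative
-- what changed: Replaces the unmatched-filtering pass plus one-by-one counter-consumption loop by the standard Mastermind histogram formula: count perfect hits in one zip pass, build Counters over the full paired prefixes, and take sum of per-color minima minus the perfect count as pseudo hits.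
import Mathlib
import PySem

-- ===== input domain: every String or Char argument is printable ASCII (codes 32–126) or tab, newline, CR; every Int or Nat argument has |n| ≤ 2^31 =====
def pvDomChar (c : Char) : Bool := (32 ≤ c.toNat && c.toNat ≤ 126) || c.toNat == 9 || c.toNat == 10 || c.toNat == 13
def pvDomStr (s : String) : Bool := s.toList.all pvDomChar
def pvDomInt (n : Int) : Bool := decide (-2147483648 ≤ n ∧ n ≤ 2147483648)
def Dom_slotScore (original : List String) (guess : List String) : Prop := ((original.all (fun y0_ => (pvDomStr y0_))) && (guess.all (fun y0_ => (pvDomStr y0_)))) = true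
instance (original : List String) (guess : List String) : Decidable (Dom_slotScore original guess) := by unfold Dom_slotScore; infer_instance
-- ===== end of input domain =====

-- B replaces A's unmatched-filtering pass and one-by-one counter-consumption loop by the
-- Mastermind histogram formula (sum of per-color minima minus perfect hits); alternative, same cost.

-- ===== PORT A =====
-- step 1: one pass over zip(original, guess) accumulating (points, unmatched_original, unmatched_guess)
def slotScoreStep1 (pairs : List (String × String)) : Int × List String × List String :=
  pairs.foldl
    (fun s og =>
      if og.1 == og.2 then (s.1 + 2, s.2.1, s.2.2)
      else (s.1, s.2.1 ++ [og.1], s.2.2 ++ [og.2]))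
    (0, [], [])

-- step 2: 'if count_original[g] > 0: points += 1; count_original[g] -= 1'
def slotScoreStep2 (start : Int × PySem.Dict String Int) (ug : List String) : Int × PySem.Dict String Int :=
  ug.foldl
    (fun s g =>
      if s.2.getD g 0 > 0 then (s.1 + 1, s.2.insert g (s.2.getD g 0 - 1)) else s)
    start

def slotScore (original : List String) (guess : List String) : Int :=
  let s1 := slotScoreStep1 (original.zip guess)
  (slotScoreStep2 (s1.1, PySem.Dict.counter s1.2.1) s1.2.2).1

-- ===== PORT B =====
def slotScore_alt (original : List String) (guess : List String) : Int :=
  let pairs := original.zip guess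
  let perfect : Int := (pairs.countP (fun og => og.1 == og.2) : Int)
  let countOrig := PySem.Dict.counter (pairs.map Prod.fst)
  let countGuess := PySem.Dict.counter (pairs.map Prod.snd)
  let total := (countOrig.keys.map (fun c => min (countOrig.getD c 0) (countGuess.getD c 0))).sum
  2 * perfect + (total - perfect)

-- ===== PRECONDITION & SPEC =====
def Spec_slotScore (original : List String) (guess : List String) (out : Int) : Prop := out = slotScore_alt original guess
instance (original : List String) (guess : List String) (out : Int) : Decidable (Spec_slotScore original guess out) := by unfold Spec_slotScore; infer_instance

-- ===== CLAIM (what is proved, stated in full; the proofs are below) =====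
def Claim_equal_slotScore : Prop := ∀ (original : List String) (guess : List String), Dom_slotScore original guess → Spec_slotScore original guess (slotScore original guess)

-- ===== LEMMAS AND PROOFS =====

-- step 1 with a general accumulator: points count the matches twice, the unmatched halves are appended
theorem slotScoreStep1_general (ps : List (String × String)) : ∀ (p : Int) (ao ag : List String),
    ps.foldl
      (fun s og =>
        if og.1 == og.2 then (s.1 + 2, s.2.1, s.2.2)
        else (s.1, s.2.1 ++ [og.1], s.2.2 ++ [og.2]))
      (p, ao, ag)
    = (p + 2 * (ps.countP (fun og => og.1 == og.2) : Int),
       ao ++ (ps.filter (fun og => !(og.1 == og.2))).map Prod.fst,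
       ag ++ (ps.filter (fun og => !(og.1 == og.2))).map Prod.snd) := by
  induction ps with
  | nil => intro p ao ag; simp
  | cons og ps ih =>
    intro p ao ag
    by_cases h : og.1 == og.2
    · simp only [List.foldl_cons, h, if_pos, List.countP_cons, List.filter_cons]
      rw [ih]
      simp
      ring
    · simp only [List.foldl_cons, List.countP_cons, List.filter_cons, h]
      rw [ih]
      simp

-- the consuming loop computes the sum of per-value minima over the guesses' values
theorem slotScoreStep2_sum (gs : List String) : ∀ (d : PySem.Dict String Int) (p : Int),
    (∀ v, 0 ≤ d.getD v 0) →
    (slotScoreStep2 (p, d) gs).1 = p + ∑ v ∈ gs.toFinset, min (d.getD v 0) (gs.count v : Int) := by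
  induction gs with
  | nil => intro d p _; simp [slotScoreStep2]
  | cons g gs ih =>
    intro d p hnn
    rw [List.toFinset_cons]
    by_cases hg : (0 : Int) < d.getD g 0
    · have hnn' : ∀ v, 0 ≤ (d.insert g (d.getD g 0 - 1)).getD v 0 := by
        intro v
        rw [PySem.Dict.getD_insert]
        split_ifs with h
        · omega
        · exact hnn v
      have hstep : slotScoreStep2 (p, d) (g :: gs)
          = slotScoreStep2 (p + 1, d.insert g (d.getD g 0 - 1)) gs := by
        simp [slotScoreStep2, hg]
      rw [hstep, ih _ _ hnn']
      by_cases hmem : g ∈ gs.toFinset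
      · rw [Finset.insert_eq_self.2 hmem,
            ← Finset.sum_erase_add _ _ hmem, ← Finset.sum_erase_add _ _ hmem]
        have hcongr : ∑ v ∈ gs.toFinset.erase g,
              min ((d.insert g (d.getD g 0 - 1)).getD v 0) (gs.count v : Int)
            = ∑ v ∈ gs.toFinset.erase g, min (d.getD v 0) ((g :: gs).count v : Int) := by
          apply Finset.sum_congr rfl
          intro v hv
          have hne : v ≠ g := Finset.ne_of_mem_erase hv
          rw [PySem.Dict.getD_insert, if_neg hne, List.count_cons, if_neg (by simpa using hne.symm)]
          simp
        rw [hcongr, PySem.Dict.getD_insert, if_pos rfl, List.count_cons, if_pos (by simp)]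
        push_cast
        omega
      · rw [Finset.sum_insert hmem]
        have hcnt : gs.count g = 0 := by
          rw [List.count_eq_zero]
          intro h; exact hmem (List.mem_toFinset.2 h)
        have hcongr : ∑ v ∈ gs.toFinset,
              min ((d.insert g (d.getD g 0 - 1)).getD v 0) (gs.count v : Int)
            = ∑ v ∈ gs.toFinset, min (d.getD v 0) ((g :: gs).count v : Int) := by
          apply Finset.sum_congr rfl
          intro v hv
          have hne : v ≠ g := fun h => hmem (h ▸ hv)
          rw [PySem.Dict.getD_insert, if_neg hne, List.count_cons, if_neg (by simpa using hne.symm)]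
          simp
        rw [hcongr, List.count_cons, if_pos (by simp), hcnt]
        push_cast
        omega
    · have hg0 : d.getD g 0 = 0 := le_antisymm (by omega) (hnn g)
      have hstep : slotScoreStep2 (p, d) (g :: gs) = slotScoreStep2 (p, d) gs := by
        simp [slotScoreStep2, hg]
      rw [hstep, ih _ _ hnn]
      by_cases hmem : g ∈ gs.toFinset
      · rw [Finset.insert_eq_self.2 hmem,
            ← Finset.sum_erase_add _ _ hmem, ← Finset.sum_erase_add _ _ hmem]
        have hcongr : ∑ v ∈ gs.toFinset.erase g, min (d.getD v 0) (gs.count v : Int)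
            = ∑ v ∈ gs.toFinset.erase g, min (d.getD v 0) ((g :: gs).count v : Int) := by
          apply Finset.sum_congr rfl
          intro v hv
          have hne : v ≠ g := Finset.ne_of_mem_erase hv
          rw [List.count_cons, if_neg (by simpa using hne.symm)]
          simp
        rw [hcongr, hg0, List.count_cons, if_pos (by simp)]
        push_cast
        omega
      · rw [Finset.sum_insert hmem]
        have hcongr : ∑ v ∈ gs.toFinset, min (d.getD v 0) (gs.count v : Int)
            = ∑ v ∈ gs.toFinset, min (d.getD v 0) ((g :: gs).count v : Int) := by
          apply Finset.sum_congr rfl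
          intro v hv
          have hne : v ≠ g := fun h => hmem (h ▸ hv)
          rw [List.count_cons, if_neg (by simpa using hne.symm)]
          simp
        rw [hcongr, hg0, List.count_cons, if_pos (by simp)]
        push_cast
        omega

-- counts split along a filter partition
theorem count_map_filter_partition (ps : List (String × String)) (pr : (String × String) → Bool)
    (f : (String × String) → String) (v : String) :
    (ps.map f).count v = ((ps.filter pr).map f).count v + ((ps.filter (fun x => !pr x)).map f).count v := by
  have hperm : ((ps.filter pr ++ ps.filter (fun x => !pr x)).map f).Perm (ps.map f) :=
    (List.filter_append_perm pr ps).map f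
  rw [← hperm.count_eq, List.map_append, List.count_append]

-- on the matched pairs, the two projections coincide
theorem map_snd_filter_eq (ps : List (String × String)) :
    (ps.filter (fun og => og.1 == og.2)).map Prod.snd
      = (ps.filter (fun og => og.1 == og.2)).map Prod.fst := by
  apply List.map_congr_left
  intro x hx
  have := (List.mem_filter.1 hx).2
  exact (beq_iff_eq.1 this).symm

-- the core identity, stated over an arbitrary pair list
theorem slotScore_core (ps : List (String × String)) :
    (slotScoreStep2 ((slotScoreStep1 ps).1, PySem.Dict.counter (slotScoreStep1 ps).2.1)
      (slotScoreStep1 ps).2.2).1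
    = 2 * (ps.countP (fun og => og.1 == og.2) : Int)
      + (((PySem.Dict.counter (ps.map Prod.fst)).keys.map
            (fun c => min ((PySem.Dict.counter (ps.map Prod.fst)).getD c 0)
                          ((PySem.Dict.counter (ps.map Prod.snd)).getD c 0))).sum
         - (ps.countP (fun og => og.1 == og.2) : Int)) := by
  -- names
  set uo := (ps.filter (fun og => !(og.1 == og.2))).map Prod.fst with huo
  set ug := (ps.filter (fun og => !(og.1 == og.2))).map Prod.snd with hug
  set mo := (ps.filter (fun og => og.1 == og.2)).map Prod.fst with hmo
  set O := ps.map Prod.fst with hO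
  set G := ps.map Prod.snd with hG
  have hs1 : slotScoreStep1 ps = (2 * (ps.countP (fun og => og.1 == og.2) : Int), uo, ug) := by
    unfold slotScoreStep1
    rw [slotScoreStep1_general]
    simp
    exact ⟨rfl, rfl⟩
  rw [hs1]
  -- left side via the loop lemma
  rw [slotScoreStep2_sum ug (PySem.Dict.counter uo) _ (by
    intro v; rw [PySem.Dict.getD_counter]; positivity)]
  simp only [PySem.Dict.getD_counter]
  -- right side: the keys of the counter are the distinct values of O, in first-occurrence order
  rw [PySem.Dict.keys_counter]
  rw [show ((PySem.Set.ofList O).map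
        (fun c => min (((ps.map Prod.fst).count c : Int)) (((ps.map Prod.snd).count c : Int)))).sum
      = ∑ v ∈ (PySem.Set.ofList O).toFinset, min ((O.count v : Int)) ((G.count v : Int)) from
    Eq.symm (List.sum_toFinset _ (PySem.Set.nodup_ofList O))]
  have hOf : (PySem.Set.ofList O).toFinset = O.toFinset := by
    apply Finset.ext
    intro v
    simp [List.mem_toFinset, PySem.Set.mem_ofList]
  rw [hOf]
  -- common summation domain
  set S := O.toFinset ∪ G.toFinset with hS
  have hugS : ug.toFinset ⊆ S := by
    intro v hv
    apply Finset.mem_union_right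
    rw [List.mem_toFinset] at hv ⊢
    obtain ⟨x, hx, rfl⟩ := List.mem_map.1 hv
    exact List.mem_map_of_mem (List.mem_of_mem_filter hx)
  have hA : ∑ v ∈ ug.toFinset, min ((uo.count v : Int)) ((ug.count v : Int))
      = ∑ v ∈ S, min ((uo.count v : Int)) ((ug.count v : Int)) := by
    apply Finset.sum_subset hugS
    intro v _ hv
    have : ug.count v = 0 := by
      rw [List.count_eq_zero]
      intro h; exact hv (List.mem_toFinset.2 h)
    rw [this]
    exact min_eq_right (by positivity)
  have hB : ∑ v ∈ O.toFinset, min ((O.count v : Int)) ((G.count v : Int))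
      = ∑ v ∈ S, min ((O.count v : Int)) ((G.count v : Int)) := by
    apply Finset.sum_subset Finset.subset_union_left
    intro v _ hv
    have : O.count v = 0 := by
      rw [List.count_eq_zero]
      intro h; exact hv (List.mem_toFinset.2 h)
    rw [this]
    exact min_eq_left (by positivity)
  -- the perfect-hit count as a sum of per-value counts of the matched originals
  have hmoS : mo.toFinset ⊆ S := by
    intro v hv
    apply Finset.mem_union_left
    rw [List.mem_toFinset] at hv ⊢
    obtain ⟨x, hx, rfl⟩ := List.mem_map.1 hv
    exact List.mem_map_of_mem (List.mem_of_mem_filter hx)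
  have hm : (ps.countP (fun og => og.1 == og.2) : Int) = ∑ v ∈ S, (mo.count v : Int) := by
    have h1 : ps.countP (fun og => og.1 == og.2) = mo.length := by
      rw [hmo, List.length_map, List.countP_eq_length_filter]
    have h2 : ∑ v ∈ mo.toFinset, mo.count v = mo.length := List.sum_toFinset_count_eq_length mo
    have h3 : ∑ v ∈ mo.toFinset, (mo.count v : Int) = ∑ v ∈ S, (mo.count v : Int) := by
      apply Finset.sum_subset hmoS
      intro v _ hv
      rw [List.count_eq_zero.2 (fun h => hv (List.mem_toFinset.2 h))]
      rfl
    rw [h1, ← h2, ← h3]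
    push_cast
    rfl
  -- count decompositions
  have hcO : ∀ v, O.count v = mo.count v + uo.count v := fun v =>
    count_map_filter_partition ps (fun og => og.1 == og.2) Prod.fst v
  have hcG : ∀ v, G.count v = mo.count v + ug.count v := by
    intro v
    have := count_map_filter_partition ps (fun og => og.1 == og.2) Prod.snd v
    rwa [map_snd_filter_eq] at this
  -- pointwise: min(cuo+m, cug+m) = min(cuo,cug) + m
  have hkey : ∑ v ∈ S, min ((O.count v : Int)) ((G.count v : Int))
      = ∑ v ∈ S, (min ((uo.count v : Int)) ((ug.count v : Int)) + (mo.count v : Int)) := by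
    apply Finset.sum_congr rfl
    intro v _
    rw [hcO v, hcG v]
    push_cast
    omega
  rw [hA, hB, hkey, Finset.sum_add_distrib, ← hm]
  ring

-- ===== VERDICT (by name: the statement is the Claim_ definition above) =====
theorem slotScore_spec : Claim_equal_slotScore := by
  intro original guess _
  unfold Spec_slotScore slotScore slotScore_alt
  simp only []
  exact slotScore_core (original.zip guess)
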